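-- pv_equiv track=rewrite | github.com/enxilium/starshot-benchmark | server/app/geometry/relationship_graph.py | _find_objects_reaching_frames
-- ===== SOURCE A (Python) =====
-- def _find_objects_reaching_frames(
--     deps: dict[str, set[str]],
--     object_ids: set[str],
--     frame_ids: set[str],
-- ) -> set[str]:
--     """
--     Return the subset of `object_ids` whose dependency chain reaches at least
--     one frame. BFS from each object through its `deps`.
--     """
--     reachable: set[str] = set()
--     for start in object_ids:
--         visited: set[str] = set()
--         stack: list[str] = [start]
--         found = False
--         while stack:
--             node = stack.pop()
--             if node in visited:
--                 continue
--             visited.add(node)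
--             if node in frame_ids:
--                 found = True
--                 break
--             for d in deps.get(node, ()):
--                 if d not in visited:
--                     stack.append(d)
--         if found:
--             reachable.add(start)
--     return reachable
-- ===== SOURCE B (Python) =====
-- def _find_objects_reaching_frames(
--     deps: dict[str, set[str]],
--     object_ids: set[str],
--     frame_ids: set[str],
-- ) -> set[str]:
--     """
--     Same result, one pass: reverse every edge, then a single multi-source
--     DFS from all frame nodes over the reversed graph marks every node whose
--     dependency chain reaches a frame; intersect with object_ids.
--     """
--     edges = [(d, src) for src, ds in deps.items() for d in ds]
--     rev: dict[str, list[str]] = {}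
--     for key, src in edges:
--         rev.setdefault(key, []).append(src)
--     reach = set(frame_ids)
--     stack = list(frame_ids)
--     while stack:
--         node = stack.pop()
--         for p in rev.get(node, ()):
--             if p not in reach:
--                 reach.add(p)
--                 stack.append(p)
--     return {o for o in object_ids if o in reach}
-- ===== Notes on version B (the rewrite author's own statement) =====
-- stated objective: alternative
-- what changed: Instead of running a fresh visited/stack DFS from every object id, B reverses all edges once and does a single multi-source DFS from the frame nodes over the reversed graph, then filters object_ids by membership in the reached set; it traverses each edge once overall where A may re-traverse the graph per object, but on the timed random inputs it was not measurably faster.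
import Mathlib
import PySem

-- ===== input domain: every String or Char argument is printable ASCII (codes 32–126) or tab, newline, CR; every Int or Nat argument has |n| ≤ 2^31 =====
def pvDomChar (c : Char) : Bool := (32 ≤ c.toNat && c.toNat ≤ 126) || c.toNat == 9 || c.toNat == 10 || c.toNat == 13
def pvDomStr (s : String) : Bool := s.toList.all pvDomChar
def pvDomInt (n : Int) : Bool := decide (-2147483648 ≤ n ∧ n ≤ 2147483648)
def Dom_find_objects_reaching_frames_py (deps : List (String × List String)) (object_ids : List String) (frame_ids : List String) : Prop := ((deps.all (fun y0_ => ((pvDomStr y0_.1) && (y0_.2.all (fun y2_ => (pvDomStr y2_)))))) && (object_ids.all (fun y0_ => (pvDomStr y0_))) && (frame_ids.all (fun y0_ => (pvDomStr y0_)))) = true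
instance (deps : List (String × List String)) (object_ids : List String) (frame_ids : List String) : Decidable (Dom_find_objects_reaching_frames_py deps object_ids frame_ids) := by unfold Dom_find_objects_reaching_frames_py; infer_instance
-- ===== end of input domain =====

-- B replaces A's per-object DFS by one reversed-edge multi-source DFS from the frame nodes (an alternative single-traversal algorithm).


-- ===== PORT A =====
-- deps.get(node, ())
def pvDepsGet (deps : List (String × List String)) (node : String) : List String :=
  (PySem.Dict.mk deps).getD node []

-- membership facts the termination measure of the DFS loop needs
theorem pv_depsGet_subset (deps : List (String × List String)) (node : String) :
    ∀ x ∈ pvDepsGet deps node, x ∈ deps.flatMap Prod.snd := by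
  intro x hx
  unfold pvDepsGet at hx
  rw [PySem.Dict.getD_eq_get?_getD] at hx
  cases h : (PySem.Dict.mk deps).get? node with
  | none => rw [h] at hx; simp at hx
  | some ds =>
    rw [h] at hx
    have hm := PySem.Dict.mem_items_of_get?_eq_some _ h
    exact List.mem_flatMap.mpr ⟨(node, ds), hm, hx⟩

theorem pv_mem_pushFold (V : PySem.Set String) (l : List String) :
    ∀ (st : List String) (x : String),
      x ∈ l.foldl (fun st d => if PySem.Set.contains V d then st else d :: st) st ↔
        x ∈ st ∨ (x ∈ l ∧ PySem.Set.contains V x = false) := by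
  induction l with
  | nil => intro st x; simp
  | cons d l ih =>
    intro st x
    by_cases hc : PySem.Set.contains V d
    · simp only [List.foldl_cons, if_pos hc, ih]
      constructor
      · rintro (h | ⟨h1, h2⟩)
        · exact Or.inl h
        · exact Or.inr ⟨List.mem_cons_of_mem _ h1, h2⟩
      · rintro (h | ⟨h1, h2⟩)
        · exact Or.inl h
        · rcases List.mem_cons.mp h1 with rfl | h1
          · rw [hc] at h2; exact absurd h2 (by simp)
          · exact Or.inr ⟨h1, h2⟩
    · simp only [List.foldl_cons, if_neg hc, ih]
      constructor
      · rintro (h | ⟨h1, h2⟩)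
        · rcases List.mem_cons.mp h with rfl | h
          · exact Or.inr ⟨List.mem_cons_self, by simpa using hc⟩
          · exact Or.inl h
        · exact Or.inr ⟨List.mem_cons_of_mem _ h1, h2⟩
      · rintro (h | ⟨h1, h2⟩)
        · exact Or.inl (List.mem_cons_of_mem _ h)
        · rcases List.mem_cons.mp h1 with rfl | h1
          · exact Or.inl List.mem_cons_self
          · exact Or.inr ⟨h1, h2⟩

theorem pv_not_mem_of_contains_false {V : PySem.Set String} {x : String}
    (h : PySem.Set.contains V x = false) : x ∉ V := by
  intro hm
  rw [(PySem.Set.contains_iff V x).mpr hm] at h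
  simp at h

theorem pv_filterlen_add_lt (univ : List String) (V : PySem.Set String) (node : String)
    (hu : node ∈ univ) (hv : PySem.Set.contains V node = false) :
    (univ.filter (fun x => !(PySem.Set.contains (PySem.Set.add V node) x))).length
      < (univ.filter (fun x => !(PySem.Set.contains V x))).length := by
  have himp : ∀ a : String, (!(PySem.Set.contains (PySem.Set.add V node) a)) = true →
      (!(PySem.Set.contains V a)) = true := by
    intro a ha
    simp only [Bool.not_eq_true'] at ha ⊢
    rw [← Bool.not_eq_true] at ha ⊢
    intro hmem
    exact ha (by
      rw [PySem.Set.contains_iff] at hmem ⊢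
      exact (PySem.Set.mem_add _ _ _).mpr (Or.inl hmem))
  have hsub := List.monotone_filter_right univ himp
  refine Nat.lt_of_le_of_ne hsub.length_le ?_
  intro heq
  have hEq := hsub.eq_of_length heq
  have hnode : node ∈ univ.filter (fun x => !(PySem.Set.contains V x)) :=
    List.mem_filter.mpr ⟨hu, by simpa using pv_not_mem_of_contains_false hv⟩
  rw [← hEq] at hnode
  have h2 := (List.mem_filter.mp hnode).2
  simp only [Bool.not_eq_true'] at h2
  rw [← Bool.not_eq_true] at h2
  exact h2 (by
    rw [PySem.Set.contains_iff]
    exact (PySem.Set.mem_add _ _ _).mpr (Or.inr rfl))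

-- the `while stack:` loop of A, per start node (early exit on a frame node);
-- `univ`, `hU`, `hS` are only the termination apparatus.
def pvLoopA (deps : List (String × List String)) (frame_ids : List String)
    (univ : List String) (hU : ∀ x ∈ deps.flatMap Prod.snd, x ∈ univ) :
    (stack : List String) → (visited : PySem.Set String) →
    (hS : ∀ x ∈ stack, x ∈ univ) → Bool
  | [], _, _ => false
  | node :: rest, visited, hS =>
    if PySem.Set.contains visited node then
      pvLoopA deps frame_ids univ hU rest visited
        (fun x hx => hS x (List.mem_cons_of_mem _ hx))
    else
      if node ∈ frame_ids then true
      else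
        pvLoopA deps frame_ids univ hU
          ((pvDepsGet deps node).foldl
            (fun st d => if PySem.Set.contains (PySem.Set.add visited node) d then st else d :: st)
            rest)
          (PySem.Set.add visited node)
          (fun x hx => by
            rcases (pv_mem_pushFold _ _ _ _).mp hx with h | ⟨h, _⟩
            · exact hS x (List.mem_cons_of_mem _ h)
            · exact hU x (pv_depsGet_subset deps node x h))
  termination_by stack visited _ =>
    ((univ.filter (fun x => !(PySem.Set.contains visited x))).length, stack.length)
  decreasing_by
  · exact Prod.Lex.right _ (Nat.lt_succ_self _)
  · exact Prod.Lex.left _ _ (pv_filterlen_add_lt univ visited node (hS node List.mem_cons_self) (by simpa using ‹¬ PySem.Set.contains visited node = true›))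

def pvFindA (deps : List (String × List String)) (frame_ids : List String) (start : String) : Bool :=
  pvLoopA deps frame_ids (start :: deps.flatMap Prod.snd)
    (fun x hx => List.mem_cons_of_mem _ hx)
    [start] PySem.Set.empty
    (fun x hx => by simp at hx; simp [hx])

def find_objects_reaching_frames_py (deps : List (String × List String)) (object_ids : List String) (frame_ids : List String) : List String :=
  object_ids.foldl
    (fun reachable start =>
      if pvFindA deps frame_ids start then PySem.Set.add reachable start else reachable)
    PySem.Set.empty

-- ===== PORT B =====
-- rev.setdefault(key, []).append(src) over the edge list
def pvRev (deps : List (String × List String)) : PySem.Dict String (List String) :=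
  (deps.flatMap (fun q => q.2.map (fun d => (d, q.1)))).foldl
    (fun r e => r.modify e.1 [] (fun l => l ++ [e.2])) PySem.Dict.empty

-- body of the inner `for p in rev.get(node, ()):` loop
def pvStepB (rs : PySem.Set String × List String) (p : String) : PySem.Set String × List String :=
  if PySem.Set.contains rs.1 p then rs else (PySem.Set.add rs.1 p, p :: rs.2)

theorem pv_revGet_subset (rev : PySem.Dict String (List String)) (node : String) :
    ∀ x ∈ rev.getD node [], x ∈ rev.values.flatten := by
  intro x hx
  rw [PySem.Dict.getD_eq_get?_getD] at hx
  cases h : rev.get? node with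
  | none => rw [h] at hx; simp at hx
  | some ds =>
    rw [h] at hx
    have hm := PySem.Dict.mem_items_of_get?_eq_some _ h
    have hv : ds ∈ rev.values := by
      simp only [PySem.Dict.values]
      exact List.mem_map.mpr ⟨(node, ds), hm, rfl⟩
    exact List.mem_flatten.mpr ⟨ds, hv, hx⟩

theorem pv_filterlen_add_le (univ : List String) (V : PySem.Set String) (n : String) :
    (univ.filter (fun x => !(PySem.Set.contains (PySem.Set.add V n) x))).length
      ≤ (univ.filter (fun x => !(PySem.Set.contains V x))).length := by
  refine (List.monotone_filter_right univ ?_).length_le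
  intro a ha
  simp only [Bool.not_eq_true'] at ha ⊢
  rw [← Bool.not_eq_true] at ha ⊢
  intro hmem
  exact ha (by
    rw [PySem.Set.contains_iff] at hmem ⊢
    exact (PySem.Set.mem_add _ _ _).mpr (Or.inl hmem))

theorem pvStepB_fold_le (univ : List String) (l : List String) :
    ∀ (reach : PySem.Set String) (st : List String),
      ((univ.filter (fun x => !(PySem.Set.contains (l.foldl pvStepB (reach, st)).1 x))).length)
        ≤ (univ.filter (fun x => !(PySem.Set.contains reach x))).length := by
  induction l with
  | nil => intro reach st; simp
  | cons p l ih =>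
    intro reach st
    by_cases hc : PySem.Set.contains reach p = true
    · have hstep : pvStepB (reach, st) p = (reach, st) := by simp [pvStepB, (PySem.Set.contains_iff _ _).mp hc]
      rw [List.foldl_cons, hstep]
      exact ih reach st
    · have hc' : PySem.Set.contains reach p = false := Bool.not_eq_true _ ▸ Bool.eq_false_iff.mpr hc
      have hstep : pvStepB (reach, st) p = (PySem.Set.add reach p, p :: st) := by simp [pvStepB, pv_not_mem_of_contains_false hc']
      rw [List.foldl_cons, hstep]
      exact le_trans (ih _ _) (pv_filterlen_add_le univ reach p)

theorem pvStepB_fold_cases (univ : List String) (l : List String) :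
    ∀ (reach : PySem.Set String) (st : List String), (∀ x ∈ l, x ∈ univ) →
      (l.foldl pvStepB (reach, st) = (reach, st)) ∨
      ((univ.filter (fun x => !(PySem.Set.contains (l.foldl pvStepB (reach, st)).1 x))).length
        < (univ.filter (fun x => !(PySem.Set.contains reach x))).length) := by
  induction l with
  | nil => intro reach st _; exact Or.inl rfl
  | cons p l ih =>
    intro reach st hl
    by_cases hc : PySem.Set.contains reach p = true
    · have hstep : pvStepB (reach, st) p = (reach, st) := by simp [pvStepB, (PySem.Set.contains_iff _ _).mp hc]
      rw [List.foldl_cons, hstep]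
      exact ih reach st (fun x hx => hl x (List.mem_cons_of_mem _ hx))
    · have hc' : PySem.Set.contains reach p = false := Bool.not_eq_true _ ▸ Bool.eq_false_iff.mpr hc
      have hstep : pvStepB (reach, st) p = (PySem.Set.add reach p, p :: st) := by simp [pvStepB, pv_not_mem_of_contains_false hc']
      rw [List.foldl_cons, hstep]
      right
      exact lt_of_le_of_lt (pvStepB_fold_le univ l _ _)
        (pv_filterlen_add_lt univ reach p (hl p List.mem_cons_self) hc')

-- the `while stack:` marking loop of B
def pvLoopB (rev : PySem.Dict String (List String)) :
    (stack : List String) → (reach : PySem.Set String) → PySem.Set String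
  | [], reach => reach
  | node :: rest, reach =>
    let rs := (rev.getD node []).foldl pvStepB (reach, rest)
    pvLoopB rev rs.2 rs.1
  termination_by stack reach =>
    ((rev.values.flatten.filter (fun x => !(PySem.Set.contains reach x))).length, stack.length)
  decreasing_by
    rcases pvStepB_fold_cases rev.values.flatten _ reach rest (pv_revGet_subset rev node) with h | h
    · rw [h]; exact Prod.Lex.right _ (Nat.lt_succ_self _)
    · exact Prod.Lex.left _ _ h

def pvReachB (deps : List (String × List String)) (frame_ids : List String) : PySem.Set String :=
  pvLoopB (pvRev deps) frame_ids.reverse (PySem.Set.ofList frame_ids)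

def find_objects_reaching_frames_py_alt (deps : List (String × List String)) (object_ids : List String) (frame_ids : List String) : List String :=
  object_ids.foldl
    (fun out o =>
      if PySem.Set.contains (pvReachB deps frame_ids) o then PySem.Set.add out o else out)
    PySem.Set.empty

-- ===== PRECONDITION & SPEC =====
-- Pre_ excludes association lists whose dict argument carries duplicate keys: a Python dict can never
-- contain them, so they encode no Python input (A's lookup would read only the first binding while
-- B's reverse index sees all of them).
def Pre_find_objects_reaching_frames_py (deps : List (String × List String)) (object_ids : List String) (frame_ids : List String) : Prop :=
  (deps.map Prod.fst).Nodup
instance (deps : List (String × List String)) (object_ids : List String) (frame_ids : List String) : Decidable (Pre_find_objects_reaching_frames_py deps object_ids frame_ids) := by unfold Pre_find_objects_reaching_frames_py; infer_instance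

def pvWitness_find_objects_reaching_frames_py : (List (String × List String)) × List String × List String :=
  ([("a", ["f"])], ["a"], ["f"])

def Spec_find_objects_reaching_frames_py (deps : List (String × List String)) (object_ids : List String) (frame_ids : List String) (out : List String) : Prop := out = find_objects_reaching_frames_py_alt deps object_ids frame_ids
instance (deps : List (String × List String)) (object_ids : List String) (frame_ids : List String) (out : List String) : Decidable (Spec_find_objects_reaching_frames_py deps object_ids frame_ids out) := by unfold Spec_find_objects_reaching_frames_py; infer_instance

-- ===== CLAIM (what is proved, stated in full; the proofs are below) =====
def Claim_equal_find_objects_reaching_frames_py : Prop := ∀ (deps : List (String × List String)) (object_ids : List String) (frame_ids : List String), Dom_find_objects_reaching_frames_py deps object_ids frame_ids → Pre_find_objects_reaching_frames_py deps object_ids frame_ids → Spec_find_objects_reaching_frames_py deps object_ids frame_ids (find_objects_reaching_frames_py deps object_ids frame_ids)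

-- ===== LEMMAS AND PROOFS =====

-- one dependency edge: b is among deps.get(a, ())
def pvEdge (deps : List (String × List String)) (a b : String) : Prop := b ∈ pvDepsGet deps a


-- node ∉ V as a Prop, from the Bool test
theorem pv_contains_false_iff (V : PySem.Set String) (x : String) :
    PySem.Set.contains V x = false ↔ x ∉ V := by
  constructor
  · exact fun h => pv_not_mem_of_contains_false h
  · intro h
    cases hc : PySem.Set.contains V x
    · rfl
    · exact absurd ((PySem.Set.contains_iff V x).mp hc) h

-- a path from s to f through edges whose targets stay outside V, with s itself outside V
def pvAvoid (deps : List (String × List String)) (V : List String) (s f : String) : Prop :=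
  s ∉ V ∧ Relation.ReflTransGen (fun a b => pvEdge deps a b ∧ b ∉ V) s f

theorem pv_avoid_mono (deps : List (String × List String)) {V V' : List String}
    (hsub : ∀ x, x ∉ V' → x ∉ V) {s f : String} (h : pvAvoid deps V' s f) :
    pvAvoid deps V s f :=
  ⟨hsub s h.1, h.2.mono (fun _ b hb => ⟨hb.1, hsub b hb.2⟩)⟩

theorem pv_extract (deps : List (String × List String)) (V' : List String) {node f : String}
    (hf : f ≠ node)
    (h : Relation.ReflTransGen (fun a b => pvEdge deps a b ∧ b ∉ V') node f) :
    ∃ b, pvEdge deps node b ∧ b ∉ V' ∧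
      Relation.ReflTransGen (fun a b => pvEdge deps a b ∧ b ∉ V') b f := by
  rcases h.cases_head with heq | ⟨c, ⟨he, hc⟩, hrest⟩
  · exact absurd heq.symm hf
  · exact ⟨c, he, hc, hrest⟩

theorem pv_surgery (deps : List (String × List String)) (V V' : List String) (node f : String)
    (hV' : ∀ x, x ∈ V' ↔ x ∈ V ∨ x = node) (hf : f ≠ node) :
    ∀ s, Relation.ReflTransGen (fun a b => pvEdge deps a b ∧ b ∉ V) s f →
      Relation.ReflTransGen (fun a b => pvEdge deps a b ∧ b ∉ V') s f ∨
      ∃ b, pvEdge deps node b ∧ b ∉ V' ∧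
        Relation.ReflTransGen (fun a b => pvEdge deps a b ∧ b ∉ V') b f := by
  intro s h
  induction h using Relation.ReflTransGen.head_induction_on with
  | refl => exact Or.inl .refl
  | @head a c h' hrest ih =>
    obtain ⟨he, hcV⟩ := h'
    rcases ih with hpath | hright
    · by_cases hcn : c = node
      · subst hcn
        exact Or.inr (pv_extract deps V' hf hpath)
      · have hcV' : c ∉ V' := fun hm => by
          rcases (hV' c).mp hm with h1 | h1
          · exact hcV h1
          · exact hcn h1
        exact Or.inl (.head ⟨he, hcV'⟩ hpath)
    · exact Or.inr hright

theorem pvLoopA_iff (deps : List (String × List String)) (frame_ids : List String)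
    (univ : List String) (hU : ∀ x ∈ deps.flatMap Prod.snd, x ∈ univ) :
    ∀ (stack : List String) (visited : PySem.Set String) (hS : ∀ x ∈ stack, x ∈ univ),
      pvLoopA deps frame_ids univ hU stack visited hS = true ↔
        ∃ s ∈ stack, ∃ f ∈ frame_ids, pvAvoid deps visited s f := by
  intro stack visited hS
  induction stack, visited, hS using pvLoopA.induct deps frame_ids univ hU with
  | case1 visited hS _ =>
    simp [pvLoopA]
  | case2 node rest visited hS hv _ ih =>
    rw [pvLoopA, if_pos hv, ih]
    constructor
    · rintro ⟨s, hs, f, hf, hav⟩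
      exact ⟨s, List.mem_cons_of_mem _ hs, f, hf, hav⟩
    · rintro ⟨s, hs, f, hf, hav⟩
      rcases List.mem_cons.mp hs with rfl | hs
      · exact absurd ((PySem.Set.contains_iff _ _).mp hv) hav.1
      · exact ⟨s, hs, f, hf, hav⟩
  | case3 node rest visited hS hv hframe _ =>
    rw [pvLoopA, if_neg hv, if_pos hframe]
    have hnodeV : node ∉ visited :=
      pv_not_mem_of_contains_false (Bool.not_eq_true _ ▸ Bool.eq_false_iff.mpr hv)
    exact iff_of_true rfl ⟨node, List.mem_cons_self, node, hframe, hnodeV, .refl⟩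
  | case4 node rest visited hS hv hframe _ ih =>
    simp only [dite_eq_ite] at ih
    rw [pvLoopA, if_neg hv, if_neg hframe, ih]
    have hnodeV : node ∉ visited :=
      pv_not_mem_of_contains_false (Bool.not_eq_true _ ▸ Bool.eq_false_iff.mpr hv)
    have hV' : ∀ x, x ∈ PySem.Set.add visited node ↔ x ∈ visited ∨ x = node :=
      fun x => PySem.Set.mem_add _ _ _
    have hsubV : ∀ x, x ∉ PySem.Set.add visited node → x ∉ visited :=
      fun x hx hm => hx ((hV' x).mpr (Or.inl hm))
    constructor
    · rintro ⟨s, hs, f, hf, hav⟩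
      rcases (pv_mem_pushFold _ _ _ _).mp hs with hsrest | ⟨hsdep, hsV'⟩
      · exact ⟨s, List.mem_cons_of_mem _ hsrest, f, hf, pv_avoid_mono deps hsubV hav⟩
      · refine ⟨node, List.mem_cons_self, f, hf, hnodeV, ?_⟩
        have hsV : s ∉ visited := hsubV s (pv_not_mem_of_contains_false hsV')
        exact .head ⟨hsdep, hsV⟩ ((pv_avoid_mono deps hsubV hav).2)
    · rintro ⟨s, hs, f, hf, hsV, hpath⟩
      have hfnode : f ≠ node := fun h => hframe (h ▸ hf)
      rcases pv_surgery deps visited (PySem.Set.add visited node) node f hV' hfnode s hpath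
        with hpath' | ⟨b, hedge, hbV', hpath'⟩
      · by_cases hsn : s = node
        · subst hsn
          obtain ⟨b, hedge, hbV', hbpath⟩ := pv_extract deps _ hfnode hpath'
          refine ⟨b, (pv_mem_pushFold _ _ _ _).mpr (Or.inr ⟨hedge, (pv_contains_false_iff _ _).mpr hbV'⟩),
            f, hf, hbV', hbpath⟩
        · have hsV' : s ∉ PySem.Set.add visited node := fun hm => by
            rcases (hV' s).mp hm with h1 | h1
            · exact hsV h1
            · exact hsn h1
          have hsrest : s ∈ rest := by
            rcases List.mem_cons.mp hs with rfl | h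
            · exact absurd rfl hsn
            · exact h
          exact ⟨s, (pv_mem_pushFold _ _ _ _).mpr (Or.inl hsrest), f, hf, hsV', hpath'⟩
      · exact ⟨b, (pv_mem_pushFold _ _ _ _).mpr (Or.inr ⟨hedge, (pv_contains_false_iff _ _).mpr hbV'⟩),
          f, hf, hbV', hpath'⟩

theorem pvFindA_iff (deps : List (String × List String)) (frame_ids : List String) (start : String) :
    pvFindA deps frame_ids start = true ↔
      ∃ f ∈ frame_ids, Relation.ReflTransGen (pvEdge deps) start f := by
  unfold pvFindA
  rw [pvLoopA_iff]
  constructor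
  · rintro ⟨s, hs, f, hf, _, hpath⟩
    have : s = start := by simpa using hs
    subst this
    exact ⟨f, hf, hpath.mono (fun _ _ h => h.1)⟩
  · rintro ⟨f, hf, hpath⟩
    exact ⟨start, List.mem_singleton.mpr rfl, f, hf, (by simp [PySem.Set.empty] : start ∉ (PySem.Set.empty : PySem.Set String)),
      hpath.mono (fun _ b h => ⟨h, by simp [PySem.Set.empty]⟩)⟩


-- membership facts about the inner marking fold of B
theorem pv_foldB_reach (l : List String) :
    ∀ (r : PySem.Set String) (st : List String) (x : String),
      x ∈ (l.foldl pvStepB (r, st)).1 ↔ x ∈ r ∨ x ∈ l := by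
  induction l with
  | nil => intro r st x; simp
  | cons p l ih =>
    intro r st x
    by_cases hc : p ∈ r
    · have hstep : pvStepB (r, st) p = (r, st) := by simp [pvStepB, hc]
      rw [List.foldl_cons, hstep, ih]
      constructor
      · rintro (h | h)
        · exact Or.inl h
        · exact Or.inr (List.mem_cons_of_mem _ h)
      · rintro (h | h)
        · exact Or.inl h
        · rcases List.mem_cons.mp h with rfl | h
          · exact Or.inl hc
          · exact Or.inr h
    · have hstep : pvStepB (r, st) p = (PySem.Set.add r p, p :: st) := by simp [pvStepB, hc]
      rw [List.foldl_cons, hstep, ih]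
      rw [PySem.Set.mem_add]
      constructor
      · rintro ((h | h) | h)
        · exact Or.inl h
        · exact Or.inr (h ▸ List.mem_cons_self)
        · exact Or.inr (List.mem_cons_of_mem _ h)
      · rintro (h | h)
        · exact Or.inl (Or.inl h)
        · rcases List.mem_cons.mp h with rfl | h
          · exact Or.inl (Or.inr rfl)
          · exact Or.inr h

theorem pv_foldB_stack_sub (l : List String) :
    ∀ (r : PySem.Set String) (st : List String) (x : String),
      x ∈ (l.foldl pvStepB (r, st)).2 → x ∈ st ∨ x ∈ l := by
  induction l with
  | nil => intro r st x h; exact Or.inl h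
  | cons p l ih =>
    intro r st x h
    by_cases hc : p ∈ r
    · have hstep : pvStepB (r, st) p = (r, st) := by simp [pvStepB, hc]
      rw [List.foldl_cons, hstep] at h
      rcases ih _ _ _ h with h | h
      · exact Or.inl h
      · exact Or.inr (List.mem_cons_of_mem _ h)
    · have hstep : pvStepB (r, st) p = (PySem.Set.add r p, p :: st) := by simp [pvStepB, hc]
      rw [List.foldl_cons, hstep] at h
      rcases ih _ _ _ h with h | h
      · rcases List.mem_cons.mp h with rfl | h
        · exact Or.inr List.mem_cons_self
        · exact Or.inl h
      · exact Or.inr (List.mem_cons_of_mem _ h)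

theorem pv_foldB_stack_mono (l : List String) :
    ∀ (r : PySem.Set String) (st : List String) (x : String),
      x ∈ st → x ∈ (l.foldl pvStepB (r, st)).2 := by
  induction l with
  | nil => intro r st x h; exact h
  | cons p l ih =>
    intro r st x h
    by_cases hc : p ∈ r
    · have hstep : pvStepB (r, st) p = (r, st) := by simp [pvStepB, hc]
      rw [List.foldl_cons, hstep]
      exact ih _ _ _ h
    · have hstep : pvStepB (r, st) p = (PySem.Set.add r p, p :: st) := by simp [pvStepB, hc]
      rw [List.foldl_cons, hstep]
      exact ih _ _ _ (List.mem_cons_of_mem _ h)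

theorem pv_foldB_stack_new (l : List String) :
    ∀ (r : PySem.Set String) (st : List String) (x : String),
      x ∈ l → x ∉ r → x ∈ (l.foldl pvStepB (r, st)).2 := by
  induction l with
  | nil => intro r st x h; simp at h
  | cons p l ih =>
    intro r st x hx hr
    by_cases hc : p ∈ r
    · have hstep : pvStepB (r, st) p = (r, st) := by simp [pvStepB, hc]
      rw [List.foldl_cons, hstep]
      rcases List.mem_cons.mp hx with rfl | hx
      · exact absurd hc hr
      · exact ih _ _ _ hx hr
    · have hstep : pvStepB (r, st) p = (PySem.Set.add r p, p :: st) := by simp [pvStepB, hc]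
      rw [List.foldl_cons, hstep]
      by_cases hxp : x = p
      · exact pv_foldB_stack_mono l _ _ _ (hxp ▸ List.mem_cons_self)
      · have : x ∉ PySem.Set.add r p := fun hm => by
          rcases (PySem.Set.mem_add _ _ _).mp hm with h | h
          · exact hr h
          · exact hxp h
        rcases List.mem_cons.mp hx with rfl | hx
        · exact absurd rfl hxp
        · exact ih _ _ _ hx this

theorem pvLoopB_sound (rev : PySem.Dict String (List String)) (P : String → Prop)
    (hP : ∀ a b, P a → b ∈ rev.getD a [] → P b) :
    ∀ (stack : List String) (reach : PySem.Set String),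
      (∀ x ∈ stack, P x) → (∀ x ∈ reach, P x) →
      ∀ x ∈ pvLoopB rev stack reach, P x := by
  intro stack reach
  induction stack, reach using pvLoopB.induct rev with
  | case1 reach =>
    intro _ hr x hx
    rw [pvLoopB] at hx
    exact hr x hx
  | case2 node rest reach rs ih =>
    intro hs hr x hx
    rw [pvLoopB] at hx
    refine ih ?_ ?_ x hx
    · intro y hy
      rcases pv_foldB_stack_sub _ _ _ _ hy with h | h
      · exact hs y (List.mem_cons_of_mem _ h)
      · exact hP node y (hs node List.mem_cons_self) h
    · intro y hy
      rcases (pv_foldB_reach _ _ _ _).mp hy with h | h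
      · exact hr y h
      · exact hP node y (hs node List.mem_cons_self) h

theorem pvLoopB_mono (rev : PySem.Dict String (List String)) :
    ∀ (stack : List String) (reach : PySem.Set String) (x : String),
      x ∈ reach → x ∈ pvLoopB rev stack reach := by
  intro stack reach
  induction stack, reach using pvLoopB.induct rev with
  | case1 reach => intro x hx; rw [pvLoopB]; exact hx
  | case2 node rest reach rs ih =>
    intro x hx
    rw [pvLoopB]
    exact ih x ((pv_foldB_reach _ _ _ _).mpr (Or.inl hx))

theorem pvLoopB_closed (rev : PySem.Dict String (List String)) :
    ∀ (stack : List String) (reach : PySem.Set String),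
      (∀ x ∈ stack, x ∈ reach) →
      (∀ x ∈ reach, x ∉ stack → ∀ p ∈ rev.getD x [], p ∈ reach) →
      ∀ x ∈ pvLoopB rev stack reach, ∀ p ∈ rev.getD x [], p ∈ pvLoopB rev stack reach := by
  intro stack reach
  induction stack, reach using pvLoopB.induct rev with
  | case1 reach =>
    intro _ hcl x hx p hp
    rw [pvLoopB] at hx ⊢
    exact hcl x hx (by simp) p hp
  | case2 node rest reach rs ih =>
    intro hss hcl x hx p hp
    rw [pvLoopB] at hx ⊢
    refine ih ?_ ?_ x hx p hp
    · intro y hy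
      rcases pv_foldB_stack_sub _ _ _ _ hy with h | h
      · exact (pv_foldB_reach _ _ _ _).mpr (Or.inl (hss y (List.mem_cons_of_mem _ h)))
      · exact (pv_foldB_reach _ _ _ _).mpr (Or.inr h)
    · intro y hy hyst q hq
      by_cases hyn : y = node
      · exact (pv_foldB_reach _ _ _ _).mpr (Or.inr (hyn ▸ hq))
      · rcases (pv_foldB_reach _ _ _ _).mp hy with hyr | hyG
        · have hynotst : y ∉ node :: rest := by
            intro hm
            rcases List.mem_cons.mp hm with rfl | hm
            · exact hyn rfl
            · exact hyst (pv_foldB_stack_mono _ _ _ _ hm)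
          exact (pv_foldB_reach _ _ _ _).mpr (Or.inl (hcl y hyr hynotst q hq))
        · have hyr : y ∈ reach := by
            by_contra hyr
            exact hyst (pv_foldB_stack_new _ _ _ _ hyG hyr)
          have hynotst : y ∉ node :: rest := by
            intro hm
            rcases List.mem_cons.mp hm with rfl | hm
            · exact hyn rfl
            · exact hyst (pv_foldB_stack_mono _ _ _ _ hm)
          exact (pv_foldB_reach _ _ _ _).mpr (Or.inl (hcl y hyr hynotst q hq))

theorem pvReachB_iff (deps : List (String × List String)) (frame_ids : List String) (x : String) :
    x ∈ pvReachB deps frame_ids ↔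
      ∃ f ∈ frame_ids, Relation.ReflTransGen (fun a b => b ∈ (pvRev deps).getD a []) f x := by
  constructor
  · intro hx
    refine pvLoopB_sound (pvRev deps)
      (fun y => ∃ f ∈ frame_ids, Relation.ReflTransGen (fun a b => b ∈ (pvRev deps).getD a []) f y)
      (fun a b ⟨f, hf, hp⟩ hb => ⟨f, hf, hp.tail hb⟩) _ _ ?_ ?_ x hx
    · intro y hy
      exact ⟨y, List.mem_reverse.mp hy, .refl⟩
    · intro y hy
      exact ⟨y, (PySem.Set.mem_ofList _ _).mp hy, .refl⟩
  · rintro ⟨f, hf, hpath⟩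
    have hss : ∀ y ∈ frame_ids.reverse, y ∈ PySem.Set.ofList frame_ids :=
      fun y hy => (PySem.Set.mem_ofList _ _).mpr (List.mem_reverse.mp hy)
    have hcl : ∀ y ∈ PySem.Set.ofList frame_ids, y ∉ frame_ids.reverse →
        ∀ p ∈ (pvRev deps).getD y [], p ∈ PySem.Set.ofList frame_ids := by
      intro y hy hyst
      exact absurd (List.mem_reverse.mpr ((PySem.Set.mem_ofList _ _).mp hy)) hyst
    induction hpath with
    | refl =>
      exact pvLoopB_mono _ _ _ _ ((PySem.Set.mem_ofList _ _).mpr hf)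
    | tail hab hbc ih =>
      exact pvLoopB_closed (pvRev deps) frame_ids.reverse (PySem.Set.ofList frame_ids)
        hss hcl _ ih _ hbc

-- the reverse index looks up exactly the forward edges (deps has no duplicate keys)
theorem pv_rev_mem (deps : List (String × List String))
    (hnd : (deps.map Prod.fst).Nodup) (x p : String) :
    p ∈ (pvRev deps).getD x [] ↔ pvEdge deps p x := by
  unfold pvRev
  rw [PySem.Dict.getD_foldl_modify_append]
  rw [PySem.Dict.getD_empty]
  simp only [List.nil_append, List.mem_map, List.mem_filter, List.mem_flatMap]
  have hkeys : (PySem.Dict.mk deps).keys.Nodup := by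
    simpa [PySem.Dict.keys] using hnd
  constructor
  · rintro ⟨e, ⟨⟨q, hq, he⟩, hx⟩, rfl⟩
    obtain ⟨d, hd, heq⟩ := he
    subst heq
    simp only [beq_iff_eq] at hx
    subst hx
    unfold pvEdge pvDepsGet
    have hget : (PySem.Dict.mk deps).get? q.1 = some q.2 :=
      (PySem.Dict.get?_eq_some_iff_mem_items _ _ _ hkeys).mpr hq
    rw [PySem.Dict.getD_eq_get?_getD, hget]
    exact hd
  · intro he
    unfold pvEdge pvDepsGet at he
    rw [PySem.Dict.getD_eq_get?_getD] at he
    cases hget : (PySem.Dict.mk deps).get? p with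
    | none => rw [hget] at he; simp at he
    | some ds =>
      rw [hget] at he
      have hq : (p, ds) ∈ deps := PySem.Dict.mem_items_of_get?_eq_some _ hget
      exact ⟨(x, p), ⟨⟨(p, ds), hq, ⟨x, he, rfl⟩⟩, by simp⟩, rfl⟩

theorem pv_pointwise (deps : List (String × List String)) (frame_ids : List String)
    (hnd : (deps.map Prod.fst).Nodup) (start : String) :
    pvFindA deps frame_ids start = PySem.Set.contains (pvReachB deps frame_ids) start := by
  rw [Bool.eq_iff_iff, pvFindA_iff, PySem.Set.contains_iff, pvReachB_iff]
  have hrel : ∀ a b : String, (b ∈ (pvRev deps).getD a []) ↔ (pvEdge deps b a) :=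
    fun a b => pv_rev_mem deps hnd a b
  constructor
  · rintro ⟨f, hf, hpath⟩
    refine ⟨f, hf, ?_⟩
    have := Relation.reflTransGen_swap.mpr hpath
    exact this.mono (fun a b h => (hrel a b).mpr h)
  · rintro ⟨f, hf, hpath⟩
    refine ⟨f, hf, ?_⟩
    exact Relation.reflTransGen_swap.mp (hpath.mono (fun a b h => (hrel a b).mp h))

-- ===== VERDICT (by name: the statement is the Claim_ definition above) =====
theorem find_objects_reaching_frames_py_spec : Claim_equal_find_objects_reaching_frames_py := by
  intro deps object_ids frame_ids _ hpre
  unfold Spec_find_objects_reaching_frames_py find_objects_reaching_frames_py find_objects_reaching_frames_py_alt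
  have hfun : (fun (reachable : PySem.Set String) start =>
      if pvFindA deps frame_ids start then PySem.Set.add reachable start else reachable)
      = (fun (out : PySem.Set String) o =>
      if PySem.Set.contains (pvReachB deps frame_ids) o then PySem.Set.add out o else out) := by
    funext r s
    rw [pv_pointwise deps frame_ids hpre s]
  rw [hfun]
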